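-- pv_equiv track=rewrite | github.com/Fliinko/Analysis-on-Enron-Dataset | Task2-Information_Retrieval.py | calculate_DF
-- ===== SOURCE A (Python) =====
-- def calculate_DF(dataset):
--
--     dfDict = {}
--
--     for i in range(len(dataset)):
--         tokens = dataset[i]
--         for w in tokens:
--             try:
--                 dfDict[w].add(i)
--             except:
--                 dfDict[w] = {i}
--
--     for i in dfDict:
--         dfDict[i] = len(dfDict[i])
--
--     return dfDict
-- ===== SOURCE B (Python) =====
-- def calculate_DF(dataset):
--     dfDict = {}
--     for tokens in dataset:
--         seen = set()
--         for w in tokens: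
--             if w not in seen:
--                 seen.add(w)
--                 dfDict[w] = dfDict.get(w, 0) + 1
--     return dfDict
-- ===== Notes on version B (the rewrite author's own statement) =====
-- stated objective: simpler
-- what changed: Counts document frequency directly in one pass with a per-document seen-set and an int counter dict, instead of accumulating a set of document indices per word and converting each set of indices to its length in a second pass.
import Mathlib
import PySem

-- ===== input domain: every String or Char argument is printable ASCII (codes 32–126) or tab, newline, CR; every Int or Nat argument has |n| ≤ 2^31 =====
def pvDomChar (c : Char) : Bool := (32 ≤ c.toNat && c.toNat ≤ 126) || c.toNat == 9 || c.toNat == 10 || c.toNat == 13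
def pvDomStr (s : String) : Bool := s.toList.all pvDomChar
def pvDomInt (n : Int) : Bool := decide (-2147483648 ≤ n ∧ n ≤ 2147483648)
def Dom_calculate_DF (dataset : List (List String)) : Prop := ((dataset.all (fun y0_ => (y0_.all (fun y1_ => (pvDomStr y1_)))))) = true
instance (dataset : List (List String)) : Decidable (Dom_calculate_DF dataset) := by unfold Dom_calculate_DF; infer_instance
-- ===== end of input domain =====

-- B replaces A's per-word set-of-document-indices accumulation plus a second
-- length-conversion pass by a single pass with a per-document seen-set and a
-- direct int counter (objective: simpler).

-- ===== PORT A =====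
-- inner token step of A's first loop: try dfDict[w].add(i) / except dfDict[w] = {i}
def pvAStep (i : Int) (d : PySem.Dict String (PySem.Set Int)) (w : String) :
    PySem.Dict String (PySem.Set Int) :=
  match d.get? w with
  | some s => d.insert w (PySem.Set.add s i)
  | none => d.insert w (PySem.Set.ofList [i])

def calculate_DF (dataset : List (List String)) : List (String × Int) :=
  let dfDict : PySem.Dict String (PySem.Set Int) :=
    (PySem.List.pyRange 0 (PySem.List.len dataset) 1).foldl
      (fun d i =>
        let tokens := PySem.List.pyGetD dataset i []
        tokens.foldl (pvAStep i) d)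
      PySem.Dict.empty
  -- 'for i in dfDict: dfDict[i] = len(dfDict[i])': the value type changes from set
  -- to int, so the in-place overwrite over the keys in order is ported as an
  -- order-preserving map over the items (overwrite keeps each key's position).
  dfDict.items.map (fun kv => (kv.1, PySem.List.len kv.2))

-- ===== PORT B =====
-- inner token step of B: if w not in seen: seen.add(w); dfDict[w] = dfDict.get(w,0)+1
def pvBStep (p : PySem.Dict String Int × PySem.Set String) (w : String) :
    PySem.Dict String Int × PySem.Set String :=
  if PySem.Set.contains p.2 w then p
  else (p.1.insert w (p.1.getD w 0 + 1), PySem.Set.add p.2 w)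

def calculate_DF_alt (dataset : List (List String)) : List (String × Int) :=
  (dataset.foldl
    (fun d tokens => (tokens.foldl pvBStep (d, PySem.Set.empty)).1)
    PySem.Dict.empty).items

-- ===== PRECONDITION & SPEC =====
def Spec_calculate_DF (dataset : List (List String)) (out : List (String × Int)) : Prop := out = calculate_DF_alt dataset
instance (dataset : List (List String)) (out : List (String × Int)) : Decidable (Spec_calculate_DF dataset out) := by unfold Spec_calculate_DF; infer_instance

-- ===== CLAIM (what is proved, stated in full; the proofs are below) =====
def Claim_equal_calculate_DF : Prop := ∀ (dataset : List (List String)), Dom_calculate_DF dataset → Spec_calculate_DF dataset (calculate_DF dataset)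

-- ===== LEMMAS AND PROOFS =====

-- value map from A's per-word state (set of document indices) to B's (its size)
def pvLen (kv : String × PySem.Set Int) : String × Int := (kv.1, PySem.List.len kv.2)

theorem pv_get?_map (l : List (String × PySem.Set Int)) (w : String) :
    (PySem.Dict.mk (l.map pvLen)).get? w
      = ((PySem.Dict.mk l).get? w).map (fun s => PySem.List.len s) := by
  induction l with
  | nil => rfl
  | cons p rest ih =>
    obtain ⟨k, v⟩ := p
    simp only [List.map_cons, pvLen, PySem.Dict.get?_mk_cons]
    by_cases h : k == w <;> simp [h, ih]

theorem pv_get?_of_items (dA : PySem.Dict String (PySem.Set Int)) (dB : PySem.Dict String Int)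
    (hR : dB.items = dA.items.map pvLen) (w : String) :
    dB.get? w = (dA.get? w).map (fun s => PySem.List.len s) := by
  have : dB = PySem.Dict.mk (dA.items.map pvLen) := by apply PySem.Dict.ext; exact hR
  rw [this]; exact pv_get?_map dA.items w

theorem pv_contains_of_items (dA : PySem.Dict String (PySem.Set Int)) (dB : PySem.Dict String Int)
    (hR : dB.items = dA.items.map pvLen) (w : String) : dB.contains w = dA.contains w := by
  rw [PySem.Dict.contains_eq_isSome_get?, PySem.Dict.contains_eq_isSome_get?,
    pv_get?_of_items dA dB hR]
  cases dA.get? w <;> rfl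

theorem pv_items_insert (dA : PySem.Dict String (PySem.Set Int)) (dB : PySem.Dict String Int)
    (hR : dB.items = dA.items.map pvLen) (w : String) (s : PySem.Set Int) :
    (dB.insert w (PySem.List.len s)).items = ((dA.insert w s).items).map pvLen := by
  rw [PySem.Dict.items_insert, PySem.Dict.items_insert, pv_contains_of_items dA dB hR]
  by_cases h : dA.contains w = true
  · simp only [h, if_true, hR, List.map_map]
    apply List.map_congr_left
    intro p _
    by_cases hp : p.1 = w <;> simp [pvLen, hp]
  · simp [h, hR, pvLen]

theorem pv_insert_self (d : PySem.Dict String (PySem.Set Int)) (w : String) (s : PySem.Set Int)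
    (hnd : d.keys.Nodup) (h : d.get? w = some s) : d.insert w s = d := by
  apply PySem.Dict.ext
  rw [PySem.Dict.items_insert_of_contains]
  · refine (List.map_congr_left ?_).trans (List.map_id _)
    intro p hp
    by_cases hpw : p.1 == w
    · have hw : p.1 = w := by simpa using hpw
      obtain ⟨k, v⟩ := p
      simp only at hw
      subst hw
      have : d.get? k = some v := PySem.Dict.get?_of_mem_items d hp hnd
      rw [h] at this
      simp [Option.some_inj.mp this]
    · simp [hpw]
  · rw [PySem.Dict.contains_eq_isSome_get?, h]; rfl

-- the invariant tying A's dict to B's dict+seen while processing document i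
def pvInv (i : Int) (dA : PySem.Dict String (PySem.Set Int))
    (dB : PySem.Dict String Int) (seen : PySem.Set String) : Prop :=
  dB.items = dA.items.map pvLen ∧
  dA.keys.Nodup ∧
  (∀ w, w ∈ seen ↔ ∃ s, dA.get? w = some s ∧ i ∈ s) ∧
  (∀ w s, dA.get? w = some s → ∀ j ∈ s, j ≤ i)

theorem pvInv_step (i : Int) (dA : PySem.Dict String (PySem.Set Int))
    (dB : PySem.Dict String Int) (seen : PySem.Set String) (w : String)
    (h : pvInv i dA dB seen) :
    pvInv i (pvAStep i dA w) (pvBStep (dB, seen) w).1 (pvBStep (dB, seen) w).2 := by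
  obtain ⟨hR, hnd, hseen, hbnd⟩ := h
  by_cases hw : w ∈ seen
  · have hc : PySem.Set.contains seen w = true := by simpa [PySem.Set.contains] using hw
    obtain ⟨s, hs, hi⟩ := (hseen w).mp hw
    have hadd : PySem.Set.add s i = s := by simp [PySem.Set.add, hi]
    have hstep : pvAStep i dA w = dA.insert w (PySem.Set.add s i) := by
      unfold pvAStep; rw [hs]
    simp only [pvBStep, hc, if_true]
    rw [hstep, hadd, pv_insert_self dA w s hnd hs]
    exact ⟨hR, hnd, hseen, hbnd⟩
  · have hc : PySem.Set.contains seen w = false := by simp [PySem.Set.contains, hw]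
    simp only [pvBStep, hc, Bool.false_eq_true, if_false]
    cases hA : dA.get? w with
    | none =>
      have hstep : pvAStep i dA w = dA.insert w ([i] : List Int) := by
        unfold pvAStep
        rw [hA, PySem.Set.ofList, List.foldl_cons]
        rfl
      rw [hstep]
      have hBw : dB.getD w 0 = 0 := by
        rw [PySem.Dict.getD_eq_get?_getD, pv_get?_of_items dA dB hR, hA]; rfl
      have hlen : (dB.getD w 0 + 1 : Int) = PySem.List.len ([i] : List Int) := by
        rw [hBw]; simp [PySem.List.len_eq]
      refine ⟨?_, PySem.Dict.nodup_keys_insert dA w _ hnd, ?_, ?_⟩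
      · simp only [hlen]
        exact pv_items_insert dA dB hR w [i]
      · intro x
        constructor
        · intro hx
          rcases (PySem.Set.mem_add seen w x).mp hx with hx | hx
          · obtain ⟨s, hs, his⟩ := (hseen x).mp hx
            refine ⟨s, ?_, his⟩
            rw [PySem.Dict.get?_insert]
            have hxw : x ≠ w := by rintro rfl; rw [hA] at hs; exact absurd hs (by simp)
            simp [hxw, hs]
          · subst hx
            exact ⟨[i], by simp, by simp⟩
        · rintro ⟨s, hs, his⟩
          rw [PySem.Dict.get?_insert] at hs
          apply (PySem.Set.mem_add seen w x).mpr
          by_cases hxw : x = w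
          · exact Or.inr hxw
          · rw [if_neg hxw] at hs
            exact Or.inl ((hseen x).mpr ⟨s, hs, his⟩)
      · intro x s hs j hj
        rw [PySem.Dict.get?_insert] at hs
        by_cases hxw : x = w
        · rw [if_pos hxw] at hs
          cases Option.some_inj.mp hs
          simp at hj
          omega
        · rw [if_neg hxw] at hs
          exact hbnd x s hs j hj
    | some s =>
      have hi : i ∉ s := fun his => hw ((hseen w).mpr ⟨s, hA, his⟩)
      have hadd : PySem.Set.add s i = s ++ [i] := by simp [PySem.Set.add, hi]
      have hstep : pvAStep i dA w = dA.insert w (s ++ [i]) := by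
        unfold pvAStep; rw [hA]
        show dA.insert w (PySem.Set.add s i) = _
        rw [hadd]
      rw [hstep]
      have hBw : dB.getD w 0 = PySem.List.len s := by
        rw [PySem.Dict.getD_eq_get?_getD, pv_get?_of_items dA dB hR, hA]; rfl
      have hlen : (dB.getD w 0 + 1 : Int) = PySem.List.len (s ++ [i]) := by
        rw [hBw]; simp [PySem.List.len_eq]
      refine ⟨?_, PySem.Dict.nodup_keys_insert dA w _ hnd, ?_, ?_⟩
      · simp only [hlen]
        exact pv_items_insert dA dB hR w (s ++ [i])
      · intro x
        constructor
        · intro hx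
          rcases (PySem.Set.mem_add seen w x).mp hx with hx | hx
          · obtain ⟨s', hs', his⟩ := (hseen x).mp hx
            by_cases hxw : x = w
            · subst hxw
              rw [hA] at hs'
              cases Option.some_inj.mp hs'
              exact ⟨s ++ [i], by simp, by simp [his]⟩
            · exact ⟨s', by rw [PySem.Dict.get?_insert, if_neg hxw]; exact hs', his⟩
          · subst hx
            exact ⟨s ++ [i], by simp, by simp⟩
        · rintro ⟨s', hs', his⟩
          rw [PySem.Dict.get?_insert] at hs'
          apply (PySem.Set.mem_add seen w x).mpr
          by_cases hxw : x = w
          · exact Or.inr hxw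
          · rw [if_neg hxw] at hs'
            exact Or.inl ((hseen x).mpr ⟨s', hs', his⟩)
      · intro x s' hs' j hj
        rw [PySem.Dict.get?_insert] at hs'
        by_cases hxw : x = w
        · rw [if_pos hxw] at hs'
          cases Option.some_inj.mp hs'
          rcases List.mem_append.mp hj with hj | hj
          · exact hbnd w s hA j hj
          · simp at hj; omega
        · rw [if_neg hxw] at hs'
          exact hbnd x s' hs' j hj

theorem pvInv_fold (i : Int) (tokens : List String)
    (dA : PySem.Dict String (PySem.Set Int)) (dB : PySem.Dict String Int)
    (seen : PySem.Set String) (h : pvInv i dA dB seen) :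
    pvInv i (tokens.foldl (pvAStep i) dA)
      (tokens.foldl pvBStep (dB, seen)).1 (tokens.foldl pvBStep (dB, seen)).2 := by
  induction tokens generalizing dA dB seen with
  | nil => exact h
  | cons t ts ih =>
    simpa [List.foldl_cons] using ih _ _ _ (pvInv_step i dA dB seen t h)

-- pyRange 0 n 1 as a mapped List.range, in the shape the outer induction uses
theorem pv_pyRange_eq (n : Nat) :
    PySem.List.pyRange 0 (n : Int) 1 = (List.range n).map (fun k => Int.ofNat k) := by
  rw [PySem.List.pyRange_zero_natCast]
  induction (List.range n) with
  | nil => rfl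
  | cons a l ih => simp_all

-- state after the first n documents, on each side
def pvAState (dataset : List (List String)) (n : Nat) : PySem.Dict String (PySem.Set Int) :=
  ((List.range n).map (fun k => Int.ofNat k)).foldl
    (fun d i => (PySem.List.pyGetD dataset i []).foldl (pvAStep i) d) PySem.Dict.empty

def pvBState (dataset : List (List String)) (n : Nat) : PySem.Dict String Int :=
  (dataset.take n).foldl
    (fun d tokens => (tokens.foldl pvBStep (d, PySem.Set.empty)).1) PySem.Dict.empty

theorem pv_outer (dataset : List (List String)) (n : Nat) (hn : n ≤ dataset.length) :
    (pvBState dataset n).items = (pvAState dataset n).items.map pvLen ∧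
    (pvAState dataset n).keys.Nodup ∧
    (∀ w s, (pvAState dataset n).get? w = some s → ∀ j ∈ s, j < (n : Int)) := by
  induction n with
  | zero => exact ⟨rfl, List.nodup_nil, fun w s hs => by exact absurd hs (by simp [pvAState])⟩
  | succ n ih =>
    obtain ⟨hR, hnd, hbnd⟩ := ih (by omega)
    have hlt : n < dataset.length := by omega
    have htok : PySem.List.pyGetD dataset (n : Int) [] = dataset[n] := by
      rw [PySem.List.pyGetD_natCast, List.getD_eq_getElem dataset [] hlt]
    have hA : pvAState dataset (n + 1)
        = (PySem.List.pyGetD dataset (n : Int) []).foldl (pvAStep (n : Int)) (pvAState dataset n) := by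
      unfold pvAState
      rw [List.range_succ, List.map_append, List.foldl_append]
      rfl
    have hB : pvBState dataset (n + 1)
        = ((dataset[n]).foldl pvBStep (pvBState dataset n, PySem.Set.empty)).1 := by
      unfold pvBState
      rw [List.take_add_one, List.getElem?_eq_getElem hlt, List.foldl_append]
      rfl
    have hinv : pvInv (n : Int) (pvAState dataset n) (pvBState dataset n) PySem.Set.empty := by
      refine ⟨hR, hnd, ?_, ?_⟩
      · intro w
        simp only [PySem.Set.empty]
        constructor
        · intro hx; exact absurd hx (List.not_mem_nil)
        · rintro ⟨s, hs, his⟩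
          exact absurd ((hbnd w s hs) _ his) (by omega)
      · intro w s hs j hj
        exact le_of_lt (hbnd w s hs j hj)
    have hres := pvInv_fold (n : Int) (PySem.List.pyGetD dataset (n : Int) [])
      (pvAState dataset n) (pvBState dataset n) PySem.Set.empty hinv
    rw [htok] at hres
    obtain ⟨hR', hnd', _, hbnd'⟩ := hres
    rw [← htok] at hR' hnd' hbnd'
    refine ⟨?_, ?_, ?_⟩
    · rw [hA, hB, ← htok]; exact hR'
    · rw [hA]; exact hnd'
    · rw [hA]
      intro w s hs j hj
      have := hbnd' w s hs j hj
      push_cast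
      omega

-- ===== VERDICT (by name: the statement is the Claim_ definition above) =====
theorem calculate_DF_spec : Claim_equal_calculate_DF := by
  intro dataset _
  unfold Spec_calculate_DF calculate_DF calculate_DF_alt
  obtain ⟨hR, -, -⟩ := pv_outer dataset dataset.length (le_refl _)
  have hA : (PySem.List.pyRange 0 (PySem.List.len dataset) 1).foldl
      (fun d i => (PySem.List.pyGetD dataset i []).foldl (pvAStep i) d) PySem.Dict.empty
      = pvAState dataset dataset.length := by
    unfold pvAState
    rw [PySem.List.len_eq, pv_pyRange_eq]
  have hB : dataset.foldl
      (fun d tokens => (tokens.foldl pvBStep (d, PySem.Set.empty)).1) PySem.Dict.empty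
      = pvBState dataset dataset.length := by
    unfold pvBState
    rw [List.take_length]
  simp only [hA, hB]
  rw [hR]
  rfl
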